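-- pv_equiv track=rewrite | github.com/Dr0x3525/Proyecto-final-programacion | ejercicios_parciales/ejercicios_recuperacion_parcial_2/ejercicio_2.py | encontrar_penultimo_primo
-- ===== SOURCE A (Python) =====
-- def Comprobar_ser_primo(numero):
--     numero = int(numero)
--     if numero <= 1:
--         return False
--     else:
--         if numero == 2:
--             return True
--         else:
--             for i in range(2,numero-1):
--                 if numero % i  == 0:
--                     return False
--             return True
--
-- def encontrar_penultimo_primo(vector):
--     contador_primos = 0
--     for indice in range(len(vector)-1,0,-1):
--         numero = vector[indice]
--         if Comprobar_ser_primo(numero):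
--             contador_primos += 1
--             if contador_primos == 2:
--                 return numero
--     return None
-- ===== SOURCE B (Python) =====
-- def Comprobar_ser_primo(numero):
--     # Equivalent primality test: trial division only up to the square root
--     # (a composite always has a divisor d with 2 <= d*d <= n).
--     numero = int(numero)
--     if numero < 2:
--         return False
--     i = 2
--     while i * i <= numero:
--         if numero % i == 0:
--             return False
--         i += 1
--     return True
--
-- def encontrar_penultimo_primo(vector):
--     # Single FORWARD pass keeping a sliding pair (second-to-last prime, last prime)
--     # over vector[1:]; at the end the first component is the answer.
--     penultimo = None
--     ultimo = None
--     for numero in vector[1:]: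
--         if Comprobar_ser_primo(numero):
--             penultimo, ultimo = ultimo, numero
--     return penultimo
-- ===== Notes on version B (the rewrite author's own statement) =====
-- stated objective: alternative
-- what changed: Replaces A's backward index scan with a running prime counter and early return by a single forward pass over vector[1:] maintaining a sliding pair (second-to-last prime, last prime), and replaces A's trial division up to n-2 by the equivalent trial division up to the square root.
import Mathlib
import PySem

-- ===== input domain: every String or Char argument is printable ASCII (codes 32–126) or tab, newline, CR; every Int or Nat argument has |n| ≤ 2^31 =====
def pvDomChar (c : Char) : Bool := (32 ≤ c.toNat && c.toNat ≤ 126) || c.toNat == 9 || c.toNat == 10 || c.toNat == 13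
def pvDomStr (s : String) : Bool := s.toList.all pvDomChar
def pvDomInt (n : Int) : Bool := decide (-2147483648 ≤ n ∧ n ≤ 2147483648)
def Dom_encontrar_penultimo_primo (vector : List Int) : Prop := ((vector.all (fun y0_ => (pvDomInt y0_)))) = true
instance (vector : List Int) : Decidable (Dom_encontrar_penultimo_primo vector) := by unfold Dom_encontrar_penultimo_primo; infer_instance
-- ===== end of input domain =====

-- B replaces A's backward counter scan with early return by a forward pass over vector[1:]
-- maintaining a sliding pair (second-to-last prime, last prime), and replaces A's trial
-- division up to n-2 by the equivalent trial division up to the square root (objective: alternative).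


-- ===== PORT A =====
-- A's helper Comprobar_ser_primo:
-- 'for i in range(2, numero-1)': i counts up from 2, fuel = number of iterations
def Comprobar_ser_primo_loop (numero : Int) : Nat → Int → Bool
  | 0, _ => true
  | fuel + 1, i => if PySem.Int.mod numero i == 0 then false else Comprobar_ser_primo_loop numero fuel (i + 1)

def Comprobar_ser_primo (numero : Int) : Bool :=
  if numero ≤ 1 then false
  else if numero == 2 then true
  else Comprobar_ser_primo_loop numero ((numero - 1) - 2).toNat 2

-- A's loop over range(len(vector)-1, 0, -1) with the running prime counter and early return
def encontrar_penultimo_primo_loop (vector : List Int) : List Int → Int → Option Int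
  | [], _ => none
  | indice :: rest, contador_primos =>
      let numero := PySem.List.pyGetD vector indice 0
      if Comprobar_ser_primo numero then
        if contador_primos + 1 == 2 then some numero
        else encontrar_penultimo_primo_loop vector rest (contador_primos + 1)
      else encontrar_penultimo_primo_loop vector rest contador_primos

def encontrar_penultimo_primo (vector : List Int) : Option Int :=
  encontrar_penultimo_primo_loop vector (PySem.List.pyRange ((vector.length : Int) - 1) 0 (-1)) 0

-- ===== PORT B =====
-- B's helper: 'while i * i <= numero' trial division; fuel numero.toNat bounds the
-- iteration count (the loop runs at most sqrt(numero) - 1 < numero times, see alt_loop lemmas)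
def Comprobar_ser_primo_alt_loop (numero : Int) : Nat → Int → Bool
  | 0, _ => true
  | fuel + 1, i =>
      if i * i ≤ numero then
        if PySem.Int.mod numero i == 0 then false
        else Comprobar_ser_primo_alt_loop numero fuel (i + 1)
      else true

def Comprobar_ser_primo_alt (numero : Int) : Bool :=
  if numero < 2 then false else Comprobar_ser_primo_alt_loop numero numero.toNat 2

-- B's forward loop: state (penultimo, ultimo), updated to (ultimo, some x) on each prime x
def encontrar_penultimo_primo_alt_loop : List Int → Option Int × Option Int → Option Int × Option Int
  | [], st => st
  | numero :: rest, (penultimo, ultimo) =>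
      if Comprobar_ser_primo_alt numero then
        encontrar_penultimo_primo_alt_loop rest (ultimo, some numero)
      else
        encontrar_penultimo_primo_alt_loop rest (penultimo, ultimo)

def encontrar_penultimo_primo_alt (vector : List Int) : Option Int :=
  (encontrar_penultimo_primo_alt_loop (PySem.List.slice vector (some 1) none) (none, none)).1

-- ===== PRECONDITION & SPEC =====
def Spec_encontrar_penultimo_primo (vector : List Int) (out : Option Int) : Prop := out = encontrar_penultimo_primo_alt vector
instance (vector : List Int) (out : Option Int) : Decidable (Spec_encontrar_penultimo_primo vector out) := by unfold Spec_encontrar_penultimo_primo; infer_instance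

-- ===== CLAIM (what is proved, stated in full; the proofs are below) =====
def Claim_equal_encontrar_penultimo_primo : Prop := ∀ (vector : List Int), Dom_encontrar_penultimo_primo vector → Spec_encontrar_penultimo_primo vector (encontrar_penultimo_primo vector)

-- ===== LEMMAS AND PROOFS =====

-- A's primality loop checks every candidate divisor in [i, i + fuel)
lemma A_loop_iff (n : Int) : ∀ (fuel i : Nat),
    (Comprobar_ser_primo_loop n fuel (i : Int) = true ↔
      ∀ j : Nat, i ≤ j → j < i + fuel → ¬ ((j : Int) ∣ n)) := by
  intro fuel
  induction fuel with
  | zero =>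
      intro i
      simp only [Comprobar_ser_primo_loop, true_iff]
      intro j h1 h2
      exact absurd h2 (by omega)
  | succ fuel ih =>
      intro i
      by_cases hm : PySem.Int.mod n (i : Int) = 0
      · have hdvd : (i : Int) ∣ n := (PySem.Int.mod_eq_zero_iff_dvd n (i : Int)).1 hm
        simp only [Comprobar_ser_primo_loop, hm, beq_self_eq_true, if_true]
        constructor
        · intro h; cases h
        · intro hall; exact absurd hdvd (hall i le_rfl (by omega))
      · have hnd : ¬ ((i : Int) ∣ n) := fun hd =>
          hm ((PySem.Int.mod_eq_zero_iff_dvd n (i : Int)).2 hd)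
        simp only [Comprobar_ser_primo_loop, beq_iff_eq, hm, if_false]
        have hcast : (i : Int) + 1 = ((i + 1 : Nat) : Int) := by push_cast; ring
        rw [hcast, ih (i + 1)]
        constructor
        · intro h j h1 h2
          rcases Nat.eq_or_lt_of_le h1 with rfl | h1'
          · exact hnd
          · exact h j h1' (by omega)
        · intro h j h1 h2
          exact h j (by omega) (by omega)

-- B's primality loop checks every candidate divisor j ≥ i with j*j ≤ n,
-- provided the fuel outlasts the square root
lemma B_loop_iff (n : Int) : ∀ (fuel i : Nat), 2 ≤ i →
    n < ((i + fuel : Nat) : Int) * ((i + fuel : Nat) : Int) →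
    (Comprobar_ser_primo_alt_loop n fuel (i : Int) = true ↔
      ∀ j : Nat, i ≤ j → (j : Int) * (j : Int) ≤ n → ¬ ((j : Int) ∣ n)) := by
  intro fuel
  induction fuel with
  | zero =>
      intro i hi hfuel
      simp only [Comprobar_ser_primo_alt_loop, true_iff]
      intro j h1 h2
      exfalso
      push_cast at hfuel h2
      nlinarith
  | succ fuel ih =>
      intro i hi hfuel
      by_cases hsq : (i : Int) * (i : Int) ≤ n
      · by_cases hm : PySem.Int.mod n (i : Int) = 0
        · have hdvd : (i : Int) ∣ n := (PySem.Int.mod_eq_zero_iff_dvd n (i : Int)).1 hm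
          simp only [Comprobar_ser_primo_alt_loop, hsq, if_true, hm, beq_self_eq_true]
          constructor
          · intro h; cases h
          · intro hall; exact absurd hdvd (hall i le_rfl hsq)
        · have hnd : ¬ ((i : Int) ∣ n) := fun hd =>
            hm ((PySem.Int.mod_eq_zero_iff_dvd n (i : Int)).2 hd)
          simp only [Comprobar_ser_primo_alt_loop, hsq, if_true, beq_iff_eq, hm, if_false]
          have hcast : (i : Int) + 1 = ((i + 1 : Nat) : Int) := by push_cast; ring
          rw [hcast, ih (i + 1) (by omega) (by
            have : i + 1 + fuel = i + (fuel + 1) := by omega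
            rw [this]; exact hfuel)]
          constructor
          · intro h j h1 h2
            rcases Nat.eq_or_lt_of_le h1 with rfl | h1'
            · exact hnd
            · exact h j h1' h2
          · intro h j h1 h2
            exact h j (by omega) h2
      · simp only [Comprobar_ser_primo_alt_loop, hsq, if_false, true_iff]
        intro j h1 h2
        exfalso
        have : (i : Int) ≤ (j : Int) := by exact_mod_cast h1
        nlinarith

-- the shared mathematical content of both primality tests
def esPrimoProp (n : Int) : Prop :=
  2 ≤ n ∧ ∀ j : Nat, 2 ≤ j → (j : Int) * (j : Int) ≤ n → ¬ ((j : Int) ∣ n)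

-- a proper divisor yields a divisor below the square root (in Nat)
lemma divisor_below_sqrt (N j : Nat) (h2 : 2 ≤ j) (hlt : j + 1 < N) (hd : j ∣ N) :
    ∃ m : Nat, 2 ≤ m ∧ m * m ≤ N ∧ m ∣ N := by
  obtain ⟨k, hk⟩ := hd
  have hk2 : 2 ≤ k := by
    rcases Nat.lt_or_ge k 2 with h | h
    · interval_cases k <;> omega
    · exact h
  rcases le_total j k with h | h
  · exact ⟨j, h2, by nlinarith, ⟨k, hk⟩⟩
  · exact ⟨k, hk2, by nlinarith, ⟨j, by rw [hk, Nat.mul_comm]⟩⟩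

lemma A_char (n : Int) : (Comprobar_ser_primo n = true ↔ esPrimoProp n) := by
  unfold Comprobar_ser_primo esPrimoProp
  by_cases h1 : n ≤ 1
  · simp only [h1, if_true]
    constructor
    · intro h; cases h
    · intro ⟨h, _⟩; omega
  · by_cases h2 : n = 2
    · subst h2
      norm_num
      intro j hj hsq
      have : (2 : Int) * 2 ≤ (j : Int) * (j : Int) := by
        have : (2 : Int) ≤ (j : Int) := by exact_mod_cast hj
        nlinarith
      omega
    · have hn3 : 3 ≤ n := by omega
      simp only [h1, if_false, beq_iff_eq, h2]
      have hcall : ((2 : Int)) = ((2 : Nat) : Int) := by norm_num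
      rw [hcall, A_loop_iff]
      have hF : (((n - 1 - 2).toNat : Int)) = n - 3 := by omega
      constructor
      · intro h
        refine ⟨by omega, ?_⟩
        intro j hj hsq hdvd
        have hjn : (j : Int) < n - 1 := by
          have hj' : (2 : Int) ≤ (j : Int) := by exact_mod_cast hj
          nlinarith
        exact h j hj (by omega) hdvd
      · intro ⟨_, h⟩ j hj hlt hdvd
        -- move to Nat and fetch a divisor below the square root
        set N := n.toNat with hN
        have hnN : n = (N : Int) := by omega
        have hjN : j ∣ N := by
          rw [hnN] at hdvd; exact_mod_cast hdvd
        have hjlt : j + 1 < N := by omega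
        obtain ⟨m, hm2, hmsq, hmd⟩ := divisor_below_sqrt N j hj hjlt hjN
        refine h m hm2 ?_ ?_
        · rw [hnN]; exact_mod_cast hmsq
        · rw [hnN]; exact_mod_cast hmd

lemma B_char (n : Int) : (Comprobar_ser_primo_alt n = true ↔ esPrimoProp n) := by
  unfold Comprobar_ser_primo_alt esPrimoProp
  by_cases h1 : n < 2
  · simp only [h1, if_true]
    constructor
    · intro h; cases h
    · intro ⟨h, _⟩; omega
  · have hn2 : 2 ≤ n := by omega
    simp only [h1, if_false]
    have hcall : ((2 : Int)) = ((2 : Nat) : Int) := by norm_num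
    rw [hcall, B_loop_iff n n.toNat 2 le_rfl (by
      have h := Int.toNat_of_nonneg (show (0:Int) ≤ n by omega)
      push_cast
      nlinarith)]
    constructor
    · intro h; exact ⟨hn2, h⟩
    · intro ⟨_, h⟩; exact h

lemma primo_eq : Comprobar_ser_primo_alt = Comprobar_ser_primo := by
  funext n
  have hA := A_char n
  have hB := B_char n
  cases hA' : Comprobar_ser_primo n <;> cases hB' : Comprobar_ser_primo_alt n <;> simp_all

-- A's loop, re-expressed over the list of scanned ELEMENTS (proof helper only)
def pvScan : List Int → Int → Option Int
  | [], _ => none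
  | x :: rest, c =>
      if Comprobar_ser_primo x then
        if c + 1 == 2 then some x else pvScan rest (c + 1)
      else pvScan rest c

lemma loop_eq_scan (vector : List Int) : ∀ (is : List Int) (c : Int),
    encontrar_penultimo_primo_loop vector is c
      = pvScan (is.map (fun i => PySem.List.pyGetD vector i 0)) c := by
  intro is
  induction is with
  | nil => intro c; rfl
  | cons i rest ih =>
      intro c
      simp only [encontrar_penultimo_primo_loop, List.map_cons, pvScan]
      split_ifs <;> simp [ih]

lemma scan_one (l : List Int) : pvScan l 1 = (l.filter Comprobar_ser_primo)[0]? := by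
  induction l with
  | nil => rfl
  | cons x rest ih =>
      simp only [pvScan, List.filter_cons]
      by_cases h : Comprobar_ser_primo x = true <;> simp [h, ih]

lemma scan_zero (l : List Int) : pvScan l 0 = (l.filter Comprobar_ser_primo)[1]? := by
  induction l with
  | nil => rfl
  | cons x rest ih =>
      simp only [pvScan, List.filter_cons]
      by_cases h : Comprobar_ser_primo x = true <;> simp [h, ih, scan_one]

-- B's loop skips non-primes: it is the sliding-pair fold over the filtered list
def pvShift : List Int → Option Int × Option Int → Option Int × Option Int
  | [], st => st
  | x :: rest, (_, ult) => pvShift rest (ult, some x)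

lemma alt_loop_eq_shift (l : List Int) : ∀ st,
    encontrar_penultimo_primo_alt_loop l st = pvShift (l.filter Comprobar_ser_primo_alt) st := by
  induction l with
  | nil => intro st; rfl
  | cons x rest ih =>
      intro st
      obtain ⟨pen, ult⟩ := st
      simp only [encontrar_penultimo_primo_alt_loop, List.filter_cons]
      by_cases h : Comprobar_ser_primo_alt x = true <;> simp [h, ih, pvShift]

-- the sliding pair ends with the second-to-last element of f (state fills the short cases)
lemma shift_fst (f : List Int) : ∀ pen ult : Option Int,
    (pvShift f (pen, ult)).1
      = if f.length = 0 then pen else if f.length = 1 then ult else f.reverse[1]? := by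
  induction f with
  | nil => intro pen ult; simp [pvShift]
  | cons x rest ih =>
      intro pen ult
      simp only [pvShift, List.length_cons]
      rw [ih]
      rcases rest with _ | ⟨a, _ | ⟨b, t⟩⟩
      · simp
      · simp
      · simp only [List.length_cons, List.reverse_cons]
        rcases ht : t.reverse with _ | ⟨y, _ | ⟨z, w⟩⟩ <;> simp [ht]

-- ===== VERDICT (by name: the statement is the Claim_ definition above) =====
theorem encontrar_penultimo_primo_spec : Claim_equal_encontrar_penultimo_primo := by
  intro vector _
  unfold Spec_encontrar_penultimo_primo
  simp only [encontrar_penultimo_primo, encontrar_penultimo_primo_alt, PySem.List.slice_from_one]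
  rw [loop_eq_scan, scan_zero, PySem.List.pyRange_neg_one_eq_reverse, List.map_reverse]
  rw [show ((0:Int) + 1) = 1 from rfl, show ((vector.length : Int) - 1 + 1) = (vector.length : Int) from by ring]
  rw [PySem.List.map_pyGetD_pyRange' vector 0 (by norm_num : (0:Int) ≤ 1)]
  rw [alt_loop_eq_shift, primo_eq, shift_fst]
  simp only [show (Int.toNat 1) = 1 from rfl, List.drop_one, List.filter_reverse]
  split_ifs with h0 h1
  · exact List.getElem?_eq_none (by simp [h0])
  · exact List.getElem?_eq_none (by simp [h1])
  · rfl
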